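-- pv_equiv track=rewrite | github.com/dodona-edu/pass-fail-article | extractors.py | get_results_binned
-- ===== SOURCE A (Python) =====
-- def get_results_binned(data):
--     results = []
--     for student in data:
--         marks = student["marks"]
--         results.append([3] if ("ex1" in marks and marks["ex1"] and marks["ex1"] >= 16) else
--                        [2] if ("ex1" in marks and marks["ex1"] and marks["ex1"] >= 12) else
--                        [1] if ("ex1" in marks and marks["ex1"] and marks["ex1"] >= 7) else [0])
--     return results
-- ===== SOURCE B (Python) =====
-- _THRESHOLDS = (7, 12, 16)
--
-- def get_results_binned(data):
--     out = []
--     for student in data: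
--         v = student["marks"].get("ex1")
--         out.append([sum(v >= t for t in _THRESHOLDS) if v else 0])
--     return out
-- ===== Notes on version B (the rewrite author's own statement) =====
-- stated objective: idiomatic
-- what changed: Replaces the chain of ternary comparisons (each re-testing membership and truthiness) with one .get lookup and a sorted threshold table (7,12,16): the bin is the count of thresholds the mark reaches.
import Mathlib
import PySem

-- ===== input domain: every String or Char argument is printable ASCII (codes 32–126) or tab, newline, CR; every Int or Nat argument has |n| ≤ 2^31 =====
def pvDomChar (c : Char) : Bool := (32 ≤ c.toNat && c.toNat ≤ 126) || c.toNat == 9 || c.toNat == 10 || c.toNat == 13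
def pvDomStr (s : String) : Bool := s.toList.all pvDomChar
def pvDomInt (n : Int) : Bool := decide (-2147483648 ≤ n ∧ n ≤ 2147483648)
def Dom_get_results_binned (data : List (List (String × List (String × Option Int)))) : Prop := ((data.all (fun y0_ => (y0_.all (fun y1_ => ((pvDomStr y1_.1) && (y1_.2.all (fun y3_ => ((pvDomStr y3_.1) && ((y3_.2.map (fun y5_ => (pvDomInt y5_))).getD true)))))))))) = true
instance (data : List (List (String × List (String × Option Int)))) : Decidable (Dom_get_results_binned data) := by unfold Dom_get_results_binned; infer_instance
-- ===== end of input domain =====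

-- B replaces A's chain of ternary comparisons by a .get lookup plus a sorted
-- threshold table (7,12,16): the bin is the number of thresholds the mark reaches.

-- ===== PORT A =====
-- "ex1" in marks and marks["ex1"] and marks["ex1"] >= t   (short-circuit chain)
def pvExCond (marks : List (String × Option Int)) (t : Int) : Bool :=
  match marks.lookup "ex1" with
  | some (some x) => x != 0 && decide (t ≤ x)
  | _ => false

def get_results_binned (data : List (List (String × List (String × Option Int)))) : List (List Int) :=
  data.foldl (fun results student =>
    -- student["marks"]: KeyError when absent (excluded by Pre_); default [] is never read under Pre_
    let marks := (student.lookup "marks").getD []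
    results ++ [if pvExCond marks 16 then [3]
                else if pvExCond marks 12 then [2]
                else if pvExCond marks 7 then [1] else [0]]) []

-- ===== PORT B =====
def pvThresholds : List Int := [7, 12, 16]

def get_results_binned_alt (data : List (List (String × List (String × Option Int)))) : List (List Int) :=
  data.foldl (fun out student =>
    let v : Option Int := (((student.lookup "marks").getD []).lookup "ex1").getD none
    out ++ [[match v with
             | some x => if x != 0 then (pvThresholds.map (fun t => if decide (t ≤ x) then (1:Int) else 0)).sum else 0
             | none => 0]]) []

-- ===== PRECONDITION & SPEC =====
-- Pre_ excludes exactly the inputs where A raises KeyError: a student dict without a "marks" key.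
def Pre_get_results_binned (data : List (List (String × List (String × Option Int)))) : Prop :=
  ∀ s ∈ data, (s.lookup "marks").isSome = true
instance (data : List (List (String × List (String × Option Int)))) : Decidable (Pre_get_results_binned data) := by unfold Pre_get_results_binned; infer_instance

def pvWitness_get_results_binned : (List (List (String × List (String × Option Int)))) :=
  [[("marks", [("ex1", some 13)])], [("marks", [("ex1", none)])], [("marks", [])]]

def Spec_get_results_binned (data : List (List (String × List (String × Option Int)))) (out : List (List Int)) : Prop := out = get_results_binned_alt data
instance (data : List (List (String × List (String × Option Int)))) (out : List (List Int)) : Decidable (Spec_get_results_binned data out) := by unfold Spec_get_results_binned; infer_instance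

-- ===== CLAIM (what is proved, stated in full; the proofs are below) =====
def Claim_equal_get_results_binned : Prop := ∀ (data : List (List (String × List (String × Option Int)))), Dom_get_results_binned data → Pre_get_results_binned data → Spec_get_results_binned data (get_results_binned data)

-- ===== LEMMAS AND PROOFS =====

-- both loops are append-folds; rewrite each to a map
theorem pv_foldl_append {α β : Type} (f : α → List β) :
    ∀ (xs : List α) (acc : List (List β)),
      xs.foldl (fun r s => r ++ [f s]) acc = acc ++ xs.map f := by
  intro xs
  induction xs with
  | nil => intro acc; simp
  | cons x xs ih => intro acc; simp [List.foldl, ih]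

-- per-student agreement (Pre_ gives the "marks" key)
theorem pv_student_eq (student : List (String × List (String × Option Int)))
    (h : (student.lookup "marks").isSome = true) :
    (if pvExCond ((student.lookup "marks").getD []) 16 then [(3:Int)]
     else if pvExCond ((student.lookup "marks").getD []) 12 then [2]
     else if pvExCond ((student.lookup "marks").getD []) 7 then [1] else [0])
    = [match (((student.lookup "marks").getD []).lookup "ex1").getD none with
       | some x => if x != 0 then (pvThresholds.map (fun t => if decide (t ≤ x) then (1:Int) else 0)).sum else 0
       | none => 0] := by
  cases hm : student.lookup "marks" with
  | none => simp [hm] at h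
  | some marks =>
    simp only [Option.getD_some]
    cases hv : marks.lookup "ex1" with
    | none => simp [pvExCond, hv]
    | some v =>
      cases v with
      | none => simp [pvExCond, hv]
      | some x =>
        simp only [pvExCond, hv, Option.getD_some, pvThresholds, List.map, List.sum]
        by_cases h0 : x = 0
        · simp [h0]
        · have hx : (x != 0) = true := by simp [h0]
          simp only [hx, Bool.true_and, if_true]
          by_cases h16 : (16:Int) ≤ x
          · simp [h16, show (12:Int) ≤ x by omega, show (7:Int) ≤ x by omega]
          · by_cases h12 : (12:Int) ≤ x
            · simp [h16, h12, show (7:Int) ≤ x by omega]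
            · by_cases h7 : (7:Int) ≤ x
              · simp [h16, h12, h7]
              · simp [h16, h12, h7]

-- ===== VERDICT (by name: the statement is the Claim_ definition above) =====
theorem get_results_binned_spec : Claim_equal_get_results_binned := by
  intro data _ hpre
  unfold Spec_get_results_binned get_results_binned get_results_binned_alt
  rw [pv_foldl_append, pv_foldl_append]
  simp only [List.nil_append]
  apply List.map_congr_left
  intro s hs
  exact pv_student_eq s (hpre s hs)
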